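-- pv_equiv track=rewrite | github.com/NormPlum/freeCodeCamp_DailyCodingChallenges | 018.py | get_laptop_cost
-- ===== SOURCE A (Python) =====
-- def get_laptop_cost(laptops, budget):
--     # Remove duplicates.
--     laptops = list(set(laptops))
--     # Sort in descending order.
--     laptops.sort(reverse = True)
--
--     for i, price in enumerate(laptops):
--         if i == 1 and price <= budget:
--             return price
--         elif i > 1 and price <= budget:
--             return price
--
--     return 0
-- ===== SOURCE B (Python) =====
-- def get_laptop_cost(laptops, budget):
--     # Single pass: overall distinct max m, then best value < m within budget.
--     if not laptops:
--         return 0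
--     m = max(laptops)
--     best = None
--     for x in laptops:
--         if x < m and x <= budget and (best is None or best < x):
--             best = x
--     return best if best is not None else 0
-- ===== Notes on version B (the rewrite author's own statement) =====
-- stated objective: faster
-- what changed: Replaces dedup + descending sort + indexed scan with two linear passes (max, then running best value below the max and within budget), no set or sort.
import Mathlib
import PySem

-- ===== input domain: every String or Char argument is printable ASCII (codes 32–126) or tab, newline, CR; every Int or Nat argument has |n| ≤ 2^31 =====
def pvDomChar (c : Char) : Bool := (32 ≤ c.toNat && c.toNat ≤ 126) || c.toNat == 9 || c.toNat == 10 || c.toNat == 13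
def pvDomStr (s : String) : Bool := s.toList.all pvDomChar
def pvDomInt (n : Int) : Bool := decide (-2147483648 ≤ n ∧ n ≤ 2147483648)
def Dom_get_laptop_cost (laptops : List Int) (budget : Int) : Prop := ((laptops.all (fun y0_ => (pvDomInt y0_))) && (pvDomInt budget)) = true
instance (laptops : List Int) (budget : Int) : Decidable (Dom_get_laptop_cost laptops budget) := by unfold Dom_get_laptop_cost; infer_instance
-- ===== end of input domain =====

-- B replaces A's dedup + descending sort + indexed scan by two linear passes (asymptotically faster).

-- ===== PORT A =====
-- the 'for i, price in enumerate(laptops): …' loop with its early returns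
def pvLoopA (budget : Int) : List (Int × Int) → Int
  | [] => 0
  | (i, price) :: rest =>
    if i = 1 ∧ price ≤ budget then price
    else if i > 1 ∧ price ≤ budget then price
    else pvLoopA budget rest

def get_laptop_cost (laptops : List Int) (budget : Int) : Int :=
  let laptops1 := PySem.Set.ofList laptops                 -- list(set(laptops))
  let laptops2 := PySem.List.sorted laptops1 (fun x => x) true   -- .sort(reverse=True)
  pvLoopA budget (PySem.List.enumerate laptops2 0)

-- ===== PORT B =====
def get_laptop_cost_alt (laptops : List Int) (budget : Int) : Int :=
  match laptops with
  | [] => 0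
  | h :: t =>
    let m := t.foldl max h                                 -- max(laptops) as the running-max loop
    let best := (h :: t).foldl
      (fun (best : Option Int) x =>
        if x < m ∧ x ≤ budget ∧ (∀ b ∈ best, b < x) then some x else best) none
    best.getD 0

-- ===== PRECONDITION & SPEC =====
def Spec_get_laptop_cost (laptops : List Int) (budget : Int) (out : Int) : Prop := out = get_laptop_cost_alt laptops budget
instance (laptops : List Int) (budget : Int) (out : Int) : Decidable (Spec_get_laptop_cost laptops budget out) := by unfold Spec_get_laptop_cost; infer_instance

-- ===== CLAIM (what is proved, stated in full; the proofs are below) =====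
def Claim_equal_get_laptop_cost : Prop := ∀ (laptops : List Int) (budget : Int), Dom_get_laptop_cost laptops budget → Spec_get_laptop_cost laptops budget (get_laptop_cost laptops budget)

-- ===== LEMMAS AND PROOFS =====

-- the value A's loop computes once index 0 is past: first element ≤ budget, else 0
def pvFirstLE (budget : Int) : List Int → Int
  | [] => 0
  | y :: ys => if y ≤ budget then y else pvFirstLE budget ys

lemma pvLoopA_enum (budget : Int) (l : List Int) :
    ∀ k : Int, 1 ≤ k → pvLoopA budget (PySem.List.enumerate l k) = pvFirstLE budget l := by
  induction l with
  | nil => intro k _; simp [PySem.List.enumerate_nil, pvLoopA, pvFirstLE]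
  | cons y ys ih =>
    intro k hk
    rw [PySem.List.enumerate_cons]
    by_cases hy : y ≤ budget
    · rcases eq_or_lt_of_le hk with h1 | h1
      · simp [pvLoopA, pvFirstLE, ← h1, hy]
      · simp [pvLoopA, pvFirstLE, hy, h1]
    · simp only [pvLoopA, pvFirstLE, hy, and_false, if_false]
      exact ih (k + 1) (by omega)

-- B's fold invariant
lemma pvFoldB (m budget : Int) (l : List Int) :
    ∀ acc : Option Int,
      (l.foldl (fun (best : Option Int) x =>
          if x < m ∧ x ≤ budget ∧ (∀ b ∈ best, b < x) then some x else best) acc = none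
        ↔ acc = none ∧ ∀ x ∈ l, ¬ (x < m ∧ x ≤ budget)) ∧
      (∀ v, l.foldl (fun (best : Option Int) x =>
          if x < m ∧ x ≤ budget ∧ (∀ b ∈ best, b < x) then some x else best) acc = some v →
        ((v ∈ l ∧ v < m ∧ v ≤ budget) ∨ acc = some v) ∧
        (∀ x ∈ l, x < m → x ≤ budget → x ≤ v) ∧
        (∀ b, acc = some b → b ≤ v)) := by
  induction l with
  | nil =>
    intro acc
    refine ⟨by simp, ?_⟩
    intro v hv
    simp only [List.foldl_nil] at hv
    exact ⟨Or.inr hv, fun x hx => by simp at hx, fun b hb => le_of_eq (Option.some_inj.mp (hv ▸ hb)).symm⟩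
  | cons x xs ih =>
    intro acc
    simp only [List.foldl_cons]
    by_cases hc : x < m ∧ x ≤ budget ∧ (∀ b ∈ acc, b < x)
    · rw [if_pos hc]
      refine ⟨?_, ?_⟩
      · rw [(ih (some x)).1]
        constructor
        · rintro ⟨h, _⟩; exact absurd h (by simp)
        · rintro ⟨_, hall⟩; exact absurd ⟨hc.1, hc.2.1⟩ (hall x (by simp))
      · intro v hv
        obtain ⟨hsrc, hub, hacc⟩ := (ih (some x)).2 v hv
        refine ⟨?_, ?_, ?_⟩
        · rcases hsrc with ⟨hm, hp⟩ | he
          · exact Or.inl ⟨List.mem_cons_of_mem _ hm, hp⟩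
          · exact Or.inl ⟨by simp [Option.some_inj.mp he], by
              have := Option.some_inj.mp he; subst this; exact ⟨hc.1, hc.2.1⟩⟩
        · intro y hy h1 h2
          rcases List.mem_cons.mp hy with rfl | hy'
          · exact hacc y rfl
          · exact hub y hy' h1 h2
        · intro b hb
          have hx := hacc x rfl
          have := hc.2.2 b (by simp [hb]); omega
    · rw [if_neg hc]
      push Not at hc
      refine ⟨?_, ?_⟩
      · rw [(ih acc).1]
        constructor
        · rintro ⟨ha, hall⟩
          refine ⟨ha, ?_⟩
          intro y hy
          rcases List.mem_cons.mp hy with rfl | hy'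
          · rintro ⟨h1, h2⟩
            have := hc h1 h2; subst ha; simp at this
          · exact hall y hy'
        · rintro ⟨ha, hall⟩
          exact ⟨ha, fun y hy => hall y (List.mem_cons_of_mem _ hy)⟩
      · intro v hv
        obtain ⟨hsrc, hub, hacc⟩ := (ih acc).2 v hv
        refine ⟨?_, ?_, ?_⟩
        · rcases hsrc with ⟨hm, hp⟩ | he
          · exact Or.inl ⟨List.mem_cons_of_mem _ hm, hp⟩
          · exact Or.inr he
        · intro y hy h1 h2
          rcases List.mem_cons.mp hy with rfl | hy'
          · -- x is not taken: some earlier acc value b with x ≤ b, and b ≤ v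
            obtain ⟨b, hbmem, hxb⟩ := hc h1 h2
            have hbv := hacc b (Option.mem_def.mp hbmem)
            omega
          · exact hub y hy' h1 h2
        · exact hacc

-- pvFirstLE on a strictly decreasing list returns the (unique) maximal element ≤ budget
lemma pvFirstLE_of_max (budget v : Int) (l : List Int)
    (hpw : l.Pairwise (fun a b => b < a)) (hv : v ∈ l) (hvb : v ≤ budget)
    (hub : ∀ y ∈ l, y ≤ budget → y ≤ v) : pvFirstLE budget l = v := by
  induction l with
  | nil => simp at hv
  | cons y ys ih =>
    rcases List.pairwise_cons.mp hpw with ⟨hy, hpw'⟩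
    by_cases hyb : y ≤ budget
    · simp only [pvFirstLE, if_pos hyb]
      rcases List.mem_cons.mp hv with rfl | hv'
      · rfl
      · have := hub y (by simp) hyb
        have := hy v hv'
        omega
    · simp only [pvFirstLE, if_neg hyb]
      rcases List.mem_cons.mp hv with rfl | hv'
      · exact absurd hvb hyb
      · exact ih hpw' hv' (fun z hz hb => hub z (List.mem_cons_of_mem _ hz) hb)

lemma pvFirstLE_of_none (budget : Int) (l : List Int)
    (h : ∀ y ∈ l, ¬ y ≤ budget) : pvFirstLE budget l = 0 := by
  induction l with
  | nil => rfl
  | cons y ys ih =>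
    simp only [pvFirstLE, if_neg (h y (by simp))]
    exact ih (fun z hz => h z (List.mem_cons_of_mem _ hz))

-- ===== VERDICT (by name: the statement is the Claim_ definition above) =====
theorem get_laptop_cost_spec : Claim_equal_get_laptop_cost := by
  intro laptops budget _
  unfold Spec_get_laptop_cost
  cases laptops with
  | nil => rfl
  | cons h t =>
    have hA0 : get_laptop_cost (h :: t) budget =
        pvLoopA budget (PySem.List.enumerate
          (PySem.List.sorted (PySem.Set.ofList (h :: t)) (fun x => x) true) 0) := rfl
    have hB0 : get_laptop_cost_alt (h :: t) budget =
        ((h :: t).foldl (fun (best : Option Int) x =>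
            if x < t.foldl max h ∧ x ≤ budget ∧ (∀ b ∈ best, b < x) then some x else best)
          none).getD 0 := rfl
    rw [hA0, hB0]
    set m := t.foldl max h with hm
    -- facts about m = max(laptops)
    have hmmem : m ∈ h :: t := by
      rcases PySem.List.foldl_max_mem t h with he | hmem
      · rw [hm, he]; simp
      · exact List.mem_cons_of_mem _ hmem
    have hmub : ∀ x ∈ h :: t, x ≤ m := by
      intro x hx
      rcases List.mem_cons.mp hx with rfl | hx'
      · exact (PySem.List.le_foldl_max t x).1
      · exact (PySem.List.le_foldl_max t h).2 x hx'
    -- the sorted deduplicated list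
    set ds := PySem.Set.ofList (h :: t) with hds
    set s := PySem.List.sorted ds (fun x => x) true with hs
    have hperm : s.Perm ds := PySem.List.sorted_perm ds (fun x => x) true
    have hnodup : s.Nodup := hperm.nodup_iff.mpr (PySem.Set.nodup_ofList (h :: t))
    have hmem : ∀ y, y ∈ s ↔ y ∈ h :: t := by
      intro y
      rw [hperm.mem_iff, hds, PySem.Set.mem_ofList]
    have hpw : s.Pairwise (fun a b => b ≤ a) :=
      PySem.List.sorted_pairwise_rev ds (fun x => x)
    have hpwlt : s.Pairwise (fun a b => b < a) := by
      have := hpw.and hnodup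
      exact this.imp (fun {a b} ⟨hle, hne⟩ => lt_of_le_of_ne hle (Ne.symm hne))
    -- s is nonempty and its head is m
    cases hsc : s with
    | nil =>
      exfalso
      have := (hmem m).mpr hmmem
      rw [hsc] at this; simp at this
    | cons a rest =>
      rw [hsc] at hmem hpwlt hnodup
      have ham : a = m := by
        have h1 : a ≤ m := hmub a ((hmem a).mp (by simp))
        have h2 : m ≤ a := by
          rcases List.mem_cons.mp ((hmem m).mpr hmmem) with rfl | hm'
          · exact le_refl _
          · exact le_of_lt ((List.pairwise_cons.mp hpwlt).1 m hm')
        omega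
      have hrestmem : ∀ y, y ∈ rest ↔ y ∈ (h :: t) ∧ y < m := by
        intro y
        constructor
        · intro hy
          refine ⟨(hmem y).mp (List.mem_cons_of_mem _ hy), ?_⟩
          have := (List.pairwise_cons.mp hpwlt).1 y hy
          omega
        · rintro ⟨hy, hlt⟩
          rcases List.mem_cons.mp ((hmem y).mpr hy) with rfl | hy'
          · omega
          · exact hy'
      -- A's loop reduces to pvFirstLE on rest
      rw [PySem.List.enumerate_cons]
      have hA : pvLoopA budget ((0, a) :: PySem.List.enumerate rest (0 + 1)) =
          pvFirstLE budget rest := by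
        simp only [pvLoopA]
        norm_num
        exact pvLoopA_enum budget rest (0 + 1) (by omega)
      rw [hA]
      -- compare with B's fold
      obtain ⟨hnone, hsome⟩ := pvFoldB m budget (h :: t) none
      cases hr : (h :: t).foldl
          (fun (best : Option Int) x =>
            if x < m ∧ x ≤ budget ∧ (∀ b ∈ best, b < x) then some x else best) none with
      | none =>
        simp only [Option.getD_none]
        apply pvFirstLE_of_none
        intro y hy hyb
        have := (hrestmem y).mp hy
        exact (hnone.mp hr).2 y this.1 ⟨this.2, hyb⟩
      | some v =>
        simp only [Option.getD_some]
        obtain ⟨hsrc, hub, _⟩ := hsome v hr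
        rcases hsrc with ⟨hvmem, hvm, hvb⟩ | he
        · apply pvFirstLE_of_max budget v rest (List.pairwise_cons.mp hpwlt).2
            ((hrestmem v).mpr ⟨hvmem, hvm⟩) hvb
          intro y hy hyb
          have := (hrestmem y).mp hy
          exact hub y this.1 this.2 hyb
        · simp at he
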